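-- pv_equiv track=rewrite | github.com/Aswitha-K28/fmcg--chatbot | practice/sql_agent.py | build_lineage
-- ===== SOURCE A (Python) =====
-- def build_lineage(schema: dict) -> dict:
--     lineage = {table: [] for table in schema}
--
--     for table, info in schema.items():
--         columns = list(info.get("columns", {}).keys())
--
--         for col in columns:
--             # detect foreign key by _id suffix
--             if col.endswith("_id"):
--                 ref_base = col.replace("_id", "")
--                 for candidate in [ref_base + "s", ref_base + "es", ref_base]:
--                     if candidate in schema and candidate != table:
--                         if not any(r["to"] == candidate for r in lineage[table]):
--                             lineage[table].append({
--                                 "to"  : candidate,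
--                                 "via" : col,
--                                 "join": f"{table}.{col} = {candidate}.{col}"
--                             })
--                         break
--
--             # detect shared columns across tables
--             for other_table, other_info in schema.items():
--                 if other_table == table:
--                     continue
--                 other_cols = list(other_info.get("columns", {}).keys())
--                 if col in other_cols:
--                     if not any(r["to"] == other_table for r in lineage[table]):
--                         lineage[table].append({
--                             "to"  : other_table,
--                             "via" : col,
--                             "join": f"{table}.{col} = {other_table}.{col}"
--                         })
--
--     return lineage
-- ===== SOURCE B (Python) =====
-- def build_lineage(schema: dict) -> dict:
--     # One pass to build an inverted index column -> tables having it (in schema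
--     # order), then per table a seen-set for dedup; only matching tables are visited.
--     pairs = [(c, t) for t, info in schema.items() for c in info.get("columns", {})]
--     col_index = {}
--     for c, t in pairs:
--         col_index.setdefault(c, []).append(t)
--
--     lineage = {}
--     for table, info in schema.items():
--         recs = []
--         seen = set()
--         for col in info.get("columns", {}):
--             if col.endswith("_id"):
--                 base = col.replace("_id", "")
--                 for cand in (base + "s", base + "es", base):
--                     if cand in schema and cand != table:
--                         if cand not in seen:
--                             seen.add(cand)
--                             recs.append({
--                                 "to": cand,
--                                 "via": col,
--                                 "join": f"{table}.{col} = {cand}.{col}",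
--                             })
--                         break
--             for other in col_index.get(col, ()):
--                 if other != table and other not in seen:
--                     seen.add(other)
--                     recs.append({
--                         "to": other,
--                         "via": col,
--                         "join": f"{table}.{col} = {other}.{col}",
--                     })
--         lineage[table] = recs
--     return lineage
-- ===== Notes on version B (the rewrite author's own statement) =====
-- stated objective: alternative
-- what changed: Replaces A's inner scan over every other table's column list (and the linear any() dedup scan over already-emitted records) by an inverted index column->tables built in one pass plus a per-table seen-set, so only tables actually sharing the column are visited.
import Mathlib
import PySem

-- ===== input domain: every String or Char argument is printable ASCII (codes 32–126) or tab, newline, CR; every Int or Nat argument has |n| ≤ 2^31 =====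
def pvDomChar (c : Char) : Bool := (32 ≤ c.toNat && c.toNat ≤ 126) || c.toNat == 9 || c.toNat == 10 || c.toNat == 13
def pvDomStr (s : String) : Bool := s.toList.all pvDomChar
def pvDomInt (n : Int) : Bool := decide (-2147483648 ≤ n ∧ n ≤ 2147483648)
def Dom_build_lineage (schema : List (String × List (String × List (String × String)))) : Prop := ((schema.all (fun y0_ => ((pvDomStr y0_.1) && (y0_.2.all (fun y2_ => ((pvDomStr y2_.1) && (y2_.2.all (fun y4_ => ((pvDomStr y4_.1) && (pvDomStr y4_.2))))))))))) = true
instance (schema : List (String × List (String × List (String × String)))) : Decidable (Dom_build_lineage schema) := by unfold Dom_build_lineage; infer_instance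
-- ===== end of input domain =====

-- B replaces A's inner scan over all tables' column lists by an inverted index
-- column -> tables (built once) plus a per-table seen-set for the dedup test.

-- shared shape helpers (the same Python sub-expressions occur in A and B)
-- list(info.get("columns", {}).keys())
def colsOf (info : List (String × List (String × String))) : List String :=
  (PySem.Dict.getD (PySem.Dict.mk info) "columns" []).map Prod.fst

-- the record literal {"to": cand, "via": col, "join": f"{table}.{col} = {cand}.{col}"}
def mkRec (table col cand : String) : List (String × String) :=
  [("to", cand), ("via", col), ("join", table ++ "." ++ col ++ " = " ++ cand ++ "." ++ col)]

-- ===== PORT A =====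
-- any(r["to"] == x for r in recs)
def anyTo (recs : List (List (String × String))) (x : String) : Bool :=
  recs.any (fun r => (PySem.Dict.mk r).get? "to" == some x)

-- the 'for candidate in [...] : … break' loop
def aFK (schema : List (String × List (String × List (String × String))))
    (table col : String) (cands : List String)
    (recs : List (List (String × String))) : List (List (String × String)) :=
  match cands with
  | [] => recs
  | c :: cs =>
    if (PySem.Dict.mk schema).contains c && c != table then
      if anyTo recs c then recs else recs ++ [mkRec table col c]
    else aFK schema table col cs recs

-- one iteration of 'for col in columns' (FK branch, then the scan over schema.items())
def aCol (schema : List (String × List (String × List (String × String))))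
    (table : String) (recs : List (List (String × String))) (col : String) :
    List (List (String × String)) :=
  let recs :=
    if PySem.Str.endswith col "_id" then
      let base := PySem.Str.replace col "_id" ""
      aFK schema table col [base ++ "s", base ++ "es", base] recs
    else recs
  schema.foldl (fun recs p =>
    if p.1 == table then recs
    else if (colsOf p.2).contains col then
      if anyTo recs p.1 then recs else recs ++ [mkRec table col p.1]
    else recs) recs

def build_lineage (schema : List (String × List (String × List (String × String)))) :
    List (String × List (List (String × String))) :=
  -- lineage = {table: [] for table in schema}
  let lineage0 := schema.foldl
    (fun d p => d.insert p.1 ([] : List (List (String × String)))) PySem.Dict.empty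
  -- for table, info in schema.items(): for col in columns: … (all appends/reads hit lineage[table])
  (schema.foldl (fun d p =>
      d.modify p.1 [] (fun recs => (colsOf p.2).foldl (aCol schema p.1) recs)) lineage0).items

-- ===== PORT B =====
-- the FK branch with the seen-set dedup
def bFK (schema : List (String × List (String × List (String × String))))
    (table col : String) (cands : List String)
    (st : List (List (String × String)) × PySem.Set String) :
    List (List (String × String)) × PySem.Set String :=
  match cands with
  | [] => st
  | c :: cs =>
    if (PySem.Dict.mk schema).contains c && c != table then
      if PySem.Set.contains st.2 c then st
      else (st.1 ++ [mkRec table col c], PySem.Set.add st.2 c)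
    else bFK schema table col cs st

-- one iteration of 'for col in …': FK branch, then only the tables the index lists for col
def bCol (schema : List (String × List (String × List (String × String))))
    (idx : PySem.Dict String (List String)) (table : String)
    (st : List (List (String × String)) × PySem.Set String) (col : String) :
    List (List (String × String)) × PySem.Set String :=
  let st :=
    if PySem.Str.endswith col "_id" then
      let base := PySem.Str.replace col "_id" ""
      bFK schema table col [base ++ "s", base ++ "es", base] st
    else st
  (idx.getD col []).foldl (fun st ot =>
    if ot != table && !(PySem.Set.contains st.2 ot) then
      (st.1 ++ [mkRec table col ot], PySem.Set.add st.2 ot)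
    else st) st

def build_lineage_alt (schema : List (String × List (String × List (String × String)))) :
    List (String × List (List (String × String))) :=
  -- pairs = [(c, t) …]; col_index built by setdefault(c, []).append(t)
  let pairs := schema.flatMap (fun p => (colsOf p.2).map (fun c => (c, p.1)))
  let idx := pairs.foldl (fun d q => d.modify q.1 [] (· ++ [q.2]))
    (PySem.Dict.empty : PySem.Dict String (List String))
  (schema.foldl (fun d p =>
      d.insert p.1 ((colsOf p.2).foldl (bCol schema idx p.1)
        ([], PySem.Set.empty)).1) PySem.Dict.empty).items

-- ===== PRECONDITION & SPEC =====
-- Pre_ excludes only association lists with duplicate dict keys (duplicate table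
-- names, or a duplicate column name inside one table's "columns" dict), which a
-- Python dict cannot carry.
def Pre_build_lineage (schema : List (String × List (String × List (String × String)))) : Prop :=
  (schema.map Prod.fst).Nodup ∧ ∀ p ∈ schema, (colsOf p.2).Nodup
instance (schema : List (String × List (String × List (String × String)))) : Decidable (Pre_build_lineage schema) := by unfold Pre_build_lineage; infer_instance

def pvWitness_build_lineage : (List (String × List (String × List (String × String)))) :=
  [("users", [("columns", [("id", "int"), ("name", "text")])]),
   ("orders", [("columns", [("user_id", "int"), ("name", "text")])])]

def Spec_build_lineage (schema : List (String × List (String × List (String × String)))) (out : List (String × List (List (String × String)))) : Prop := out = build_lineage_alt schema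
instance (schema : List (String × List (String × List (String × String)))) (out : List (String × List (List (String × String)))) : Decidable (Spec_build_lineage schema out) := by unfold Spec_build_lineage; infer_instance

-- ===== CLAIM (what is proved, stated in full; the proofs are below) =====
def Claim_equal_build_lineage : Prop := ∀ (schema : List (String × List (String × List (String × String)))), Dom_build_lineage schema → Pre_build_lineage schema → Spec_build_lineage schema (build_lineage schema)

-- ===== LEMMAS AND PROOFS =====

-- the per-table dedup invariant: the seen-set holds exactly the "to" fields of recs
def SeenInv (recs : List (List (String × String))) (seen : PySem.Set String) : Prop :=
  ∀ x, PySem.Set.contains seen x = anyTo recs x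

theorem get?_mkRec_to (t c v : String) : (PySem.Dict.mk (mkRec t c v)).get? "to" = some v := by
  simp [mkRec, PySem.Dict.get?_mk_cons]

theorem anyTo_append_mkRec (recs : List (List (String × String))) (t c v x : String) :
    anyTo (recs ++ [mkRec t c v]) x = (anyTo recs x || (v == x)) := by
  simp [anyTo, List.any_append, get?_mkRec_to]

theorem contains_add (s : PySem.Set String) (c x : String) :
    PySem.Set.contains (PySem.Set.add s c) x = (PySem.Set.contains s x || (x == c)) := by
  by_cases h : c ∈ s <;> by_cases hx : x = c <;>
    simp [PySem.Set.add, PySem.Set.contains, h, hx]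

theorem fk_eq (schema : List (String × List (String × List (String × String))))
    (t c : String) (cands : List String)
    (recs : List (List (String × String))) (seen : PySem.Set String) (h : SeenInv recs seen) :
    (bFK schema t c cands (recs, seen)).1 = aFK schema t c cands recs ∧
    SeenInv (bFK schema t c cands (recs, seen)).1 (bFK schema t c cands (recs, seen)).2 := by
  induction cands with
  | nil => exact ⟨rfl, h⟩
  | cons a cs ih =>
    by_cases hc : ((PySem.Dict.mk schema).contains a && a != t) = true
    · rw [bFK, aFK, if_pos hc, if_pos hc]
      by_cases hs : PySem.Set.contains seen a = true
      · rw [if_pos hs, ← h a, if_pos hs]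
        exact ⟨rfl, h⟩
      · rw [if_neg hs, ← h a, if_neg hs]
        refine ⟨rfl, fun x => ?_⟩
        rw [contains_add, anyTo_append_mkRec, h x]
        rw [BEq.comm]
    · rw [bFK, aFK, if_neg hc, if_neg hc]
      exact ih

theorem shared_eq (t c : String) (l : List (String × List (String × List (String × String))))
    (recs : List (List (String × String))) (seen : PySem.Set String) (h : SeenInv recs seen) :
    (((l.filter (fun p => (colsOf p.2).contains c)).map Prod.fst).foldl (fun st ot =>
        if ot != t && !(PySem.Set.contains st.2 ot) then
          (st.1 ++ [mkRec t c ot], PySem.Set.add st.2 ot)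
        else st) (recs, seen)).1 =
      l.foldl (fun recs p =>
        if p.1 == t then recs
        else if (colsOf p.2).contains c then
          if anyTo recs p.1 then recs else recs ++ [mkRec t c p.1]
        else recs) recs ∧
    SeenInv (((l.filter (fun p => (colsOf p.2).contains c)).map Prod.fst).foldl (fun st ot =>
        if ot != t && !(PySem.Set.contains st.2 ot) then
          (st.1 ++ [mkRec t c ot], PySem.Set.add st.2 ot)
        else st) (recs, seen)).1
      (((l.filter (fun p => (colsOf p.2).contains c)).map Prod.fst).foldl (fun st ot =>
        if ot != t && !(PySem.Set.contains st.2 ot) then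
          (st.1 ++ [mkRec t c ot], PySem.Set.add st.2 ot)
        else st) (recs, seen)).2 := by
  induction l generalizing recs seen with
  | nil => exact ⟨rfl, h⟩
  | cons p l ih =>
    by_cases hcol : c ∈ colsOf p.2
    · by_cases hp : p.1 = t
      · simpa [List.filter_cons, hcol, hp] using ih recs seen h
      · by_cases hseen : p.1 ∈ seen
        · have ha : anyTo recs p.1 = true := by
            rw [← h p.1]; simp [PySem.Set.contains, hseen]
          simpa [List.filter_cons, hcol, hp, hseen, ha] using ih recs seen h
        · have ha : anyTo recs p.1 = false := by
            rw [← h p.1]; simp [PySem.Set.contains, hseen]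
          have h' : SeenInv (recs ++ [mkRec t c p.1]) (PySem.Set.add seen p.1) := fun x => by
            rw [contains_add, anyTo_append_mkRec, h x, BEq.comm]
          simpa [List.filter_cons, hcol, hp, hseen, ha] using ih _ _ h'
    · by_cases hp : p.1 = t <;> simpa [List.filter_cons, hcol, hp] using ih recs seen h

theorem col_eq (schema : List (String × List (String × List (String × String))))
    (idx : PySem.Dict String (List String)) (t : String)
    (hidx : ∀ c, idx.getD c [] = (schema.filter (fun p => (colsOf p.2).contains c)).map Prod.fst)
    (recs : List (List (String × String))) (seen : PySem.Set String) (col : String)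
    (h : SeenInv recs seen) :
    (bCol schema idx t (recs, seen) col).1 = aCol schema t recs col ∧
    SeenInv (bCol schema idx t (recs, seen) col).1 (bCol schema idx t (recs, seen) col).2 := by
  unfold bCol aCol
  by_cases he : PySem.Str.endswith col "_id" = true
  · simp only [he, if_true]
    obtain ⟨h1, h2⟩ := fk_eq schema t col
      [PySem.Str.replace col "_id" "" ++ "s", PySem.Str.replace col "_id" "" ++ "es",
        PySem.Str.replace col "_id" ""] recs seen h
    have hsh := shared_eq t col schema _ _ h2
    rw [hidx col, ← h1]
    exact hsh
  · simp only [he, if_false]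
    have hsh := shared_eq t col schema recs seen h
    rw [hidx col]
    exact hsh

theorem table_eq (schema : List (String × List (String × List (String × String))))
    (idx : PySem.Dict String (List String)) (t : String)
    (hidx : ∀ c, idx.getD c [] = (schema.filter (fun p => (colsOf p.2).contains c)).map Prod.fst)
    (cols : List String) (recs : List (List (String × String))) (seen : PySem.Set String)
    (h : SeenInv recs seen) :
    (cols.foldl (bCol schema idx t) (recs, seen)).1 = cols.foldl (aCol schema t) recs := by
  induction cols generalizing recs seen with
  | nil => rfl
  | cons c cs ih =>
    obtain ⟨h1, h2⟩ := col_eq schema idx t hidx recs seen c h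
    rw [List.foldl_cons, List.foldl_cons, ← h1]
    exact ih _ _ h2

theorem filter_map_keyed (t c : String) (l : List String) (hl : l.Nodup) :
    ((l.map (fun c' => (c', t))).filter (fun q => q.1 == c)).map Prod.snd =
      if l.contains c then [t] else [] := by
  induction l with
  | nil => simp
  | cons a l ih =>
    obtain ⟨ha, hl'⟩ := List.nodup_cons.mp hl
    by_cases hac : a = c
    · subst hac
      simp [List.filter_cons, ih hl', ha]
    · simp [List.filter_cons, hac, Ne.symm hac, ih hl']

theorem pairs_filter (c : String) (schema : List (String × List (String × List (String × String))))
    (hnd : ∀ p ∈ schema, (colsOf p.2).Nodup) :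
    ((schema.flatMap (fun p => (colsOf p.2).map (fun c' => (c', p.1)))).filter
        (fun q => q.1 == c)).map Prod.snd =
      (schema.filter (fun p => (colsOf p.2).contains c)).map Prod.fst := by
  induction schema with
  | nil => simp
  | cons p l ih =>
    have hh := filter_map_keyed p.1 c (colsOf p.2) (hnd p (List.mem_cons_self))
    have ih' := ih (fun q hq => hnd q (List.mem_cons_of_mem p hq))
    rw [List.flatMap_cons, List.filter_append, List.map_append, hh, List.filter_cons, ih']
    by_cases hcol : (colsOf p.2).contains c = true
    · rw [if_pos hcol, if_pos hcol]; simp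
    · rw [if_neg hcol, if_neg hcol]; simp

theorem idx_getD (schema : List (String × List (String × List (String × String))))
    (hnd : ∀ p ∈ schema, (colsOf p.2).Nodup) (c : String) :
    ((schema.flatMap (fun p => (colsOf p.2).map (fun c' => (c', p.1)))).foldl
        (fun d q => d.modify q.1 [] (· ++ [q.2]))
        (PySem.Dict.empty : PySem.Dict String (List String))).getD c [] =
      (schema.filter (fun p => (colsOf p.2).contains c)).map Prod.fst := by
  rw [PySem.Dict.getD_foldl_modify_append]
  simp only [PySem.Dict.getD_empty, List.nil_append]
  exact pairs_filter c schema hnd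

theorem getD_insert_nil_fold (l : List (String × List (String × List (String × String))))
    (d : PySem.Dict String (List (List (String × String))))
    (hd : ∀ k, d.getD k [] = []) (k : String) :
    (l.foldl (fun d p => d.insert p.1 ([] : List (List (String × String)))) d).getD k [] = [] := by
  induction l generalizing d with
  | nil => exact hd k
  | cons p l ih =>
    refine ih _ (fun k' => ?_)
    rw [PySem.Dict.getD_insert]
    split <;> simp [hd]

theorem getD_fold_modify_untouched
    (F : (String × List (String × List (String × String))) →
      List (List (String × String)) → List (List (String × String)))
    (l : List (String × List (String × List (String × String))))
    (d : PySem.Dict String (List (List (String × String)))) (k : String)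
    (hk : k ∉ l.map Prod.fst) :
    (l.foldl (fun d q => d.modify q.1 [] (F q)) d).getD k [] = d.getD k [] := by
  induction l generalizing d with
  | nil => rfl
  | cons q l ih =>
    rw [List.foldl_cons, ih _ (fun hm => hk (List.mem_cons_of_mem _ hm)),
      PySem.Dict.getD_modify_of_ne]
    intro hkq
    exact hk (by simp [hkq])

theorem getD_fold_modify_once
    (F : (String × List (String × List (String × String))) →
      List (List (String × String)) → List (List (String × String)))
    (l : List (String × List (String × List (String × String))))
    (d : PySem.Dict String (List (List (String × String))))
    (hnd : (l.map Prod.fst).Nodup)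
    (p : String × List (String × List (String × String))) (hp : p ∈ l) :
    (l.foldl (fun d q => d.modify q.1 [] (F q)) d).getD p.1 [] = F p (d.getD p.1 []) := by
  induction l generalizing d with
  | nil => cases hp
  | cons q l ih =>
    rw [List.map_cons] at hnd
    obtain ⟨hq, hnd'⟩ := List.nodup_cons.mp hnd
    rcases List.mem_cons.mp hp with hpq | hpl
    · subst hpq
      rw [List.foldl_cons, getD_fold_modify_untouched F l _ p.1 (by simpa using hq),
        PySem.Dict.getD_modify_self]
    · have hne : p.1 ≠ q.1 := fun hh => hq (hh ▸ List.mem_map_of_mem hpl)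
      rw [List.foldl_cons, ih _ hnd' hpl, PySem.Dict.getD_modify_of_ne _ _ _ hne]

theorem foldl_add_fresh (l : List String) : ∀ (s : PySem.Set String), l.Nodup →
    (∀ x ∈ l, x ∉ s) → l.foldl PySem.Set.add s = s ++ l := by
  induction l with
  | nil => intro s _ _; simp
  | cons a l ih =>
    intro s hnd hf
    obtain ⟨ha, hnd'⟩ := List.nodup_cons.mp hnd
    have hadd : PySem.Set.add s a = s ++ [a] := by
      simp [PySem.Set.add, hf a List.mem_cons_self]
    rw [List.foldl_cons, hadd, ih (s ++ [a]) hnd' ?_]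
    · simp
    · intro x hx
      simp only [List.mem_append, List.mem_singleton]
      rintro (hs | hxa)
      · exact hf x (List.mem_cons_of_mem _ hx) hs
      · exact ha (hxa ▸ hx)

theorem foldl_add_subset (l : List String) : ∀ (s : PySem.Set String),
    (∀ x ∈ l, x ∈ s) → l.foldl PySem.Set.add s = s := by
  induction l with
  | nil => intro s _; rfl
  | cons a l ih =>
    intro s hf
    have hadd : PySem.Set.add s a = s := by
      simp [PySem.Set.add, hf a List.mem_cons_self]
    rw [List.foldl_cons, hadd, ih s (fun x hx => hf x (List.mem_cons_of_mem _ hx))]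

-- the inverted index of B, as a named term (proof-side only)
def mkIdx (schema : List (String × List (String × List (String × String)))) :
    PySem.Dict String (List String) :=
  (schema.flatMap (fun p => (colsOf p.2).map (fun c => (c, p.1)))).foldl
    (fun d q => d.modify q.1 [] (· ++ [q.2])) PySem.Dict.empty

-- ===== VERDICT (by name: the statement is the Claim_ definition above) =====
theorem build_lineage_spec : Claim_equal_build_lineage := by
  intro schema _ hpre
  obtain ⟨hnd, hcols⟩ := hpre
  have hidx : ∀ c, (mkIdx schema).getD c [] =
      (schema.filter (fun p => (colsOf p.2).contains c)).map Prod.fst :=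
    fun c => idx_getD schema hcols c
  have hinv0 : SeenInv [] PySem.Set.empty := fun x => by
    simp [anyTo, PySem.Set.contains, PySem.Set.empty]
  have hB : build_lineage_alt schema = schema.map (fun p =>
      (p.1, ((colsOf p.2).foldl (bCol schema (mkIdx schema) p.1) ([], PySem.Set.empty)).1)) := by
    have h1 := PySem.Dict.items_foldl_insert_fresh schema Prod.fst
      (fun p => ((colsOf p.2).foldl (bCol schema (mkIdx schema) p.1) ([], PySem.Set.empty)).1)
      PySem.Dict.empty (fun a _ => by simp) hnd
    simpa using h1
  have h0 : ∀ k, (schema.foldl (fun d p => d.insert p.1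
      ([] : List (List (String × String)))) PySem.Dict.empty).getD k [] = [] :=
    fun k => getD_insert_nil_fold schema PySem.Dict.empty (fun k => by simp) k
  have hk0 : (schema.foldl (fun d p => d.insert p.1
      ([] : List (List (String × String)))) PySem.Dict.empty).keys = schema.map Prod.fst := by
    have h1 := PySem.Dict.keys_foldl_insert_key schema Prod.fst
      (fun _ _ => ([] : List (List (String × String)))) PySem.Dict.empty
    rw [PySem.Dict.keys_empty] at h1
    exact h1.trans ((foldl_add_fresh _ [] hnd (by simp)).trans (List.nil_append _))
  have hkfin : (schema.foldl (fun d p => d.modify p.1 []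
        (fun recs => (colsOf p.2).foldl (aCol schema p.1) recs))
      (schema.foldl (fun d p => d.insert p.1 ([] : List (List (String × String))))
        PySem.Dict.empty)).keys = schema.map Prod.fst := by
    have h1 := PySem.Dict.keys_foldl_modify_key schema Prod.fst
      ([] : List (List (String × String)))
      (fun _ p recs => (colsOf p.2).foldl (aCol schema p.1) recs)
      (schema.foldl (fun d p => d.insert p.1 ([] : List (List (String × String))))
        PySem.Dict.empty)
    rw [hk0] at h1
    exact h1.trans (foldl_add_subset _ _ (fun x hx => hx))
  have hA : build_lineage schema = schema.map (fun p =>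
      (p.1, (colsOf p.2).foldl (aCol schema p.1) [])) := by
    have hitems := PySem.Dict.items_eq_map_keys
      (schema.foldl (fun d p => d.modify p.1 []
          (fun recs => (colsOf p.2).foldl (aCol schema p.1) recs))
        (schema.foldl (fun d p => d.insert p.1 ([] : List (List (String × String))))
          PySem.Dict.empty))
      (by rw [hkfin]; exact hnd) ([] : List (List (String × String)))
    rw [hkfin, List.map_map] at hitems
    refine hitems.trans (List.map_congr_left (fun p hp => ?_))
    have hg : (schema.foldl (fun d p => d.modify p.1 []
          (fun recs => (colsOf p.2).foldl (aCol schema p.1) recs))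
        (schema.foldl (fun d p => d.insert p.1 ([] : List (List (String × String))))
          PySem.Dict.empty)).getD p.1 [] =
        (colsOf p.2).foldl (aCol schema p.1)
          ((schema.foldl (fun d p => d.insert p.1 ([] : List (List (String × String))))
            PySem.Dict.empty).getD p.1 []) :=
      getD_fold_modify_once
        (fun q recs => (colsOf q.2).foldl (aCol schema q.1) recs) schema _ hnd p hp
    simp only [Function.comp_apply]
    rw [hg, h0 p.1]
  unfold Spec_build_lineage
  rw [hA, hB]
  refine List.map_congr_left (fun p hp => ?_)
  exact congrArg (fun x => (p.1, x))
    (table_eq schema (mkIdx schema) p.1 hidx (colsOf p.2) [] PySem.Set.empty hinv0).symm
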